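-- pv_equiv track=rewrite | github.com/iEdgir01/gmail_organiser | export_filters_xml.py | dedup_patterns
-- ===== SOURCE A (Python) =====
-- def _query_term(pat: str) -> str:
--     pat = pat.strip()
--     if pat.startswith("@"):
--         return pat[1:]
--     return pat
--
-- def dedup_patterns(patterns: list) -> list:
--     """Remove patterns covered by a broader pattern (substring)."""
--     terms = [_query_term(p) for p in patterns]
--     keep  = []
--     for i, t in enumerate(terms):
--         covered = any(q != t and q in t for j, q in enumerate(terms) if i != j)
--         if not covered:
--             keep.append(patterns[i])
--     return keep
-- ===== SOURCE B (Python) =====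
-- def _query_term(pat: str) -> str:
--     pat = pat.strip()
--     if pat.startswith("@"):
--         return pat[1:]
--     return pat
--
-- def dedup_patterns(patterns: list) -> list:
--     """Remove patterns covered by a broader pattern (substring).
--
--     A distinct term q != t is contained in t iff some proper-length substring
--     of t equals q, so instead of scanning all other terms for each t we
--     enumerate t's substrings of length < len(t) and look them up in the set
--     of distinct terms.
--     """
--     terms = [_query_term(p) for p in patterns]
--     distinct = set(terms)
--     def covered(t: str) -> bool:
--         n = len(t)
--         return any(t[a:a + k] in distinct
--                    for k in range(n) for a in range(n - k + 1))
--     return [p for p, t in zip(patterns, terms) if not covered(t)]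
-- ===== Notes on version B (the rewrite author's own statement) =====
-- stated objective: faster
-- what changed: Instead of scanning all other terms for each term (quadratic in the number of patterns, with index bookkeeping to skip i == j), B builds the set of distinct terms once and, for each term t, enumerates t's substrings of length < len(t) and looks them up in that set; a distinct term q != t occurs in t iff such a substring equals q.
import Mathlib
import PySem

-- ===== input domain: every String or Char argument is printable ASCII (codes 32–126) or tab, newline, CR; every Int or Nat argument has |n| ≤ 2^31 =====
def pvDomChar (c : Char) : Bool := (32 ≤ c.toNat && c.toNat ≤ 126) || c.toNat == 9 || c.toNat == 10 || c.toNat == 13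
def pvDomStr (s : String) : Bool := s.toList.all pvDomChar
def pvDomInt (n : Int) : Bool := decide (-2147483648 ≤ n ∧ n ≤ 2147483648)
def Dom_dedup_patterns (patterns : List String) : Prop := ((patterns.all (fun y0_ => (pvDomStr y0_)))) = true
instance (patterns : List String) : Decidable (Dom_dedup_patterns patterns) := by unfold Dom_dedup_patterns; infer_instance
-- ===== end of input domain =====

-- B replaces A's quadratic all-pairs scan with a set of distinct terms built once plus
-- per-term substring enumeration; a timing run measured it faster (objective: faster).


-- ===== PORT A =====
-- _query_term (identical helper in Source A and Source B)
def pvQueryTerm (p : String) : String :=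
  let pat := PySem.Str.strip p
  if PySem.Str.startswith pat "@" then PySem.Str.slice pat (some 1) none else pat

def dedup_patterns (patterns : List String) : List String :=
  let terms := patterns.map pvQueryTerm
  (PySem.List.enumerate terms).foldl
    (fun keep it =>
      let covered := (PySem.List.enumerate terms).any
        (fun jq => decide (it.1 ≠ jq.1) && ((jq.2 != it.2) && PySem.Str.isIn jq.2 it.2))
      if covered then keep else keep ++ [PySem.List.pyGetD patterns it.1 ""]) []

-- ===== PORT B =====
def pvCovered (distinct : PySem.Set String) (t : String) : Bool :=
  let n := PySem.Str.len t
  (PySem.List.pyRange 0 n 1).any (fun k =>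
    (PySem.List.pyRange 0 (n - k + 1) 1).any (fun a =>
      PySem.Set.contains distinct (PySem.Str.slice t (some a) (some (a + k)))))

def dedup_patterns_alt (patterns : List String) : List String :=
  let terms := patterns.map pvQueryTerm
  let distinct := PySem.Set.ofList terms
  ((patterns.zip terms).filter (fun pt => !pvCovered distinct pt.2)).map (fun pt => pt.1)

-- ===== PRECONDITION & SPEC =====
def Spec_dedup_patterns (patterns : List String) (out : List String) : Prop := out = dedup_patterns_alt patterns
instance (patterns : List String) (out : List String) : Decidable (Spec_dedup_patterns patterns out) := by unfold Spec_dedup_patterns; infer_instance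

-- ===== CLAIM (what is proved, stated in full; the proofs are below) =====
def Claim_equal_dedup_patterns : Prop := ∀ (patterns : List String), Dom_dedup_patterns patterns → Spec_dedup_patterns patterns (dedup_patterns patterns)

-- ===== LEMMAS AND PROOFS =====

-- B's substring-enumeration test agrees with "some distinct term ≠ t occurs in t".
lemma covB_eq (terms : List String) (t : String) :
    pvCovered (PySem.Set.ofList terms) t
      = terms.any (fun q => (q != t) && PySem.Str.isIn q t) := by
  rw [Bool.eq_iff_iff]
  unfold pvCovered
  simp only [List.any_eq_true, PySem.List.mem_pyRange_one, PySem.Set.contains_iff,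
    PySem.Set.mem_ofList, Bool.and_eq_true, bne_iff_ne, ne_eq, PySem.Str.isIn_iff_infix,
    PySem.Str.len_eq]
  constructor
  · rintro ⟨k, ⟨hk0, hkn⟩, a, ⟨ha0, han⟩, hmem⟩
    have hts : (PySem.Str.slice t (some a) (some (a + k))).toList
        = List.take k.toNat (List.drop a.toNat t.toList) := by
      rw [PySem.Str.toList_slice]
      show PySem.List.slice t.toList (some a) (some (a + k))
        = List.take k.toNat (List.drop a.toNat t.toList)
      rw [PySem.List.slice_toNat t.toList ha0 (by omega)]
      congr 1
      omega
    refine ⟨_, hmem, ?_, ?_⟩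
    · intro he
      have hlen : (PySem.Str.slice t (some a) (some (a + k))).toList.length
          = t.toList.length := by rw [he]
      rw [hts] at hlen
      simp only [List.length_take, List.length_drop] at hlen
      omega
    · rw [hts]
      exact (List.take_prefix _ _).isInfix.trans (List.drop_suffix _ _).isInfix
  · rintro ⟨q, hq, hne, hinf⟩
    obtain ⟨pre, suf, hps⟩ := hinf
    have hlen : pre.length + q.toList.length + suf.length = t.toList.length := by
      rw [← hps]; simp; omega
    have hKL : q.toList.length < t.toList.length := by
      by_contra h
      have h1 : pre.length = 0 ∧ suf.length = 0 := by omega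
      have hpre : pre = [] := List.eq_nil_of_length_eq_zero h1.1
      have hsuf : suf = [] := List.eq_nil_of_length_eq_zero h1.2
      subst hpre; subst hsuf
      simp only [List.nil_append, List.append_nil] at hps
      exact hne (String.toList_inj.mp hps)
    refine ⟨(q.toList.length : Int), ⟨by omega, by exact_mod_cast hKL⟩,
      (pre.length : Int), ⟨by omega, by omega⟩, ?_⟩
    have hts : (PySem.Str.slice t (some (pre.length : Int))
          (some ((pre.length : Int) + (q.toList.length : Int)))).toList = q.toList := by
      rw [PySem.Str.toList_slice]
      show PySem.List.slice t.toList (some (pre.length : Int))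
        (some ((pre.length : Int) + (q.toList.length : Int))) = q.toList
      rw [PySem.List.slice_toNat t.toList (by omega) (by omega)]
      rw [List.append_assoc] at hps
      rw [← hps]
      have h1 : ((pre.length : Int) + (q.toList.length : Int)).toNat - ((pre.length : Int)).toNat
          = q.toList.length := by omega
      have h2 : ((pre.length : Int)).toNat = pre.length := by omega
      rw [h1, h2, List.drop_left, List.take_left]
    rw [String.toList_inj.mp hts]
    exact hq

-- A's indexed inner scan agrees with the index-free scan (the i = j case is killed by q ≠ t).
lemma covA_eq (terms : List String) (k : Nat) (hk : k < terms.length) :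
    ((PySem.List.enumerate terms).any
      (fun jq => decide ((k : Int) ≠ jq.1) && ((jq.2 != terms[k]) && PySem.Str.isIn jq.2 terms[k])))
      = terms.any (fun q => (q != terms[k]) && PySem.Str.isIn q terms[k]) := by
  rw [Bool.eq_iff_iff]
  simp only [List.any_eq_true]
  constructor
  · rintro ⟨jq, hmem, hp⟩
    rcases (PySem.List.mem_enumerate_iff terms 0 jq).mp hmem with ⟨j, hj, rfl⟩
    simp only [Bool.and_eq_true, decide_eq_true_eq] at hp
    exact ⟨terms[j], List.getElem_mem hj, by rw [Bool.and_eq_true]; exact hp.2⟩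
  · rintro ⟨q, hq, hp⟩
    rcases List.mem_iff_getElem.mp hq with ⟨j, hj, rfl⟩
    refine ⟨((j : Int), terms[j]), (PySem.List.mem_enumerate_iff _ _ _).mpr ⟨j, hj, by simp⟩, ?_⟩
    simp only [Bool.and_eq_true, decide_eq_true_eq] at hp ⊢
    refine ⟨?_, hp⟩
    intro hkj
    have hkj' : k = j := by exact_mod_cast hkj
    subst hkj'
    simp at hp

-- A's enumerate/append loop, with its test depending only on the term, is the zip/filter/map.
lemma loopA_gen (full : List String) (P : String → Bool) :
    ∀ (ts ps : List String) (s : Int) (acc : List String),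
      ts.length = ps.length →
      (∀ k : Nat, k < ts.length → PySem.List.pyGetD full (s + k) "" = ps.getD k "") →
      (PySem.List.enumerate ts s).foldl
        (fun keep it => if P it.2 then keep else keep ++ [PySem.List.pyGetD full it.1 ""]) acc
      = acc ++ ((ps.zip ts).filter (fun pt => !P pt.2)).map (fun pt => pt.1) := by
  intro ts
  induction ts with
  | nil =>
    intro ps s acc hlen _
    have : ps = [] := by
      cases ps
      · rfl
      · simp at hlen
    subst this
    simp [PySem.List.enumerate_nil]
  | cons t ts ih =>
    intro ps s acc hlen hget
    cases ps with
    | nil => simp at hlen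
    | cons p ps =>
      rw [PySem.List.enumerate_cons]
      simp only [List.foldl_cons]
      have h0 : PySem.List.pyGetD full s "" = p := by
        have := hget 0 (by simp)
        simpa using this
      have hget' : ∀ k : Nat, k < ts.length →
          PySem.List.pyGetD full ((s + 1) + k) "" = ps.getD k "" := by
        intro k hk
        have := hget (k + 1) (by simpa using Nat.succ_lt_succ hk)
        have harg : s + ((k : Nat) + 1 : Nat) = (s + 1) + (k : Nat) := by omega
        rw [harg] at this
        simpa using this
      have hlen' : ts.length = ps.length := by simpa using hlen
      by_cases hP : P t
      · simp only [hP, if_true, h0]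
        rw [ih ps (s + 1) acc hlen' hget']
        simp [hP]
      · simp only [hP, Bool.false_eq_true, if_false, h0]
        rw [ih ps (s + 1) (acc ++ [p]) hlen' hget']
        simp [hP]

-- ===== VERDICT (by name: the statement is the Claim_ definition above) =====
theorem dedup_patterns_spec : Claim_equal_dedup_patterns := by
  intro patterns _
  show dedup_patterns patterns = dedup_patterns_alt patterns
  unfold dedup_patterns dedup_patterns_alt
  set terms := patterns.map pvQueryTerm with hterms
  have hcongr : (PySem.List.enumerate terms).foldl
      (fun keep it =>
        let covered := (PySem.List.enumerate terms).any
          (fun jq => decide (it.1 ≠ jq.1) && ((jq.2 != it.2) && PySem.Str.isIn jq.2 it.2))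
        if covered then keep else keep ++ [PySem.List.pyGetD patterns it.1 ""]) []
      = (PySem.List.enumerate terms).foldl
        (fun keep it => if pvCovered (PySem.Set.ofList terms) it.2 then keep
          else keep ++ [PySem.List.pyGetD patterns it.1 ""]) [] := by
    apply PySem.List.foldl_congr_mem
    intro acc it hit
    rcases (PySem.List.mem_enumerate_iff terms 0 it).mp hit with ⟨k, hk, rfl⟩
    simp only [zero_add, covB_eq]
    rw [covA_eq terms k hk]
  rw [hcongr, loopA_gen patterns (fun t => pvCovered (PySem.Set.ofList terms) t) terms patterns 0 []]
  · simp [hterms]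
  · simp [hterms]
  · intro k hk
    have hk' : k < patterns.length := by simpa [hterms] using hk
    simp [PySem.List.pyGetD_natCast, List.getD, hk']
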